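-- pv_equiv track=rewrite | github.com/raphey/binary-matrices | matrix_generator.py | perform_inversions
-- ===== SOURCE A (Python) =====
-- def invert_row(mat, i):
--     n = len(mat)
--     for j in range(0, n):
--         mat[i][j] = 1 - mat[i][j]
--
-- def invert_col(mat, j):
--     n = len(mat)
--     for i in range(0, n):
--         mat[i][j] = 1 - mat[i][j]
--
-- def copy(mat):
--     n = len(mat)
--     new_arr = []
--     for i in range(0, n):
--         new_arr.append([])
--         for j in range(0, n):
--             new_arr[i].append(mat[i][j])
--     return new_arr
--
-- def perform_inversions(mat, row_str, col_str):
--     inversion_mat = copy(mat)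
--     n = len(mat)
--     for s in range(0, n):
--         if row_str[s] == "1":
--             invert_row(inversion_mat, s)
--     for t in range(0, n):
--         if col_str[t] == "1":
--             invert_col(inversion_mat, t)
--     return inversion_mat
-- ===== SOURCE B (Python) =====
-- def perform_inversions(mat, row_str, col_str):
--     n = len(mat)
--     rows = [row_str[i] == "1" for i in range(n)]
--     cols = [col_str[j] == "1" for j in range(n)]
--     return [[row[j] if rows[i] == cols[j] else 1 - row[j] for j in range(n)]
--             for i, row in enumerate(mat)]
-- ===== Notes on version B (the rewrite author's own statement) =====
-- stated objective: simpler
-- what changed: Replaces copy-then-mutating row/column sweeps with a single nested comprehension that builds each output cell directly from precomputed row/column flags (flip when exactly one flag is set), with no mutation and no intermediate copy.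
import Mathlib
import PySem

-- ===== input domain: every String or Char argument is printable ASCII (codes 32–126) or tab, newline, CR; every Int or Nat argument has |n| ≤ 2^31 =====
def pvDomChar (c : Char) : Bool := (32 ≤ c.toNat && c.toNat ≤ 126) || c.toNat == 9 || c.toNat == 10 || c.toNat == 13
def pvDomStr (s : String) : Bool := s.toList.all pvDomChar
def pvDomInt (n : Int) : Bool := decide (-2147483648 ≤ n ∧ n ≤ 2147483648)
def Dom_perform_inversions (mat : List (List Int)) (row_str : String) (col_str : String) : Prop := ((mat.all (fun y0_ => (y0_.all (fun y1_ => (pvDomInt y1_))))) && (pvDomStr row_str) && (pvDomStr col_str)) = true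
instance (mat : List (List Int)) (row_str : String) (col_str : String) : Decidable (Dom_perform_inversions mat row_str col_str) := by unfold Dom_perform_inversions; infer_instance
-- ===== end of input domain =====

-- B replaces A's copy-then-mutating row/column sweeps by one nested comprehension that builds
-- each output cell directly from precomputed row/column flags (objective: simpler). A does not
-- mutate its argument (it works on a copy), and neither does B.

-- ===== PORT A =====
-- All Python indices below are nonnegative and (under Pre_) in range, so mat[i][j] / row_str[s]
-- is ported with getD (exact for in-range nonnegative indices); mat[i][j] = v becomes List.set.

-- invert_row(mat, i): n = len(mat); for j in range(0, n): mat[i][j] = 1 - mat[i][j]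
def pvInvertRow (mat : List (List Int)) (i : Nat) : List (List Int) :=
  (List.range mat.length).foldl
    (fun m j => m.set i ((m.getD i []).set j (1 - (m.getD i []).getD j 0))) mat

-- invert_col(mat, j): n = len(mat); for i in range(0, n): mat[i][j] = 1 - mat[i][j]
def pvInvertCol (mat : List (List Int)) (j : Nat) : List (List Int) :=
  (List.range mat.length).foldl
    (fun m i => m.set i ((m.getD i []).set j (1 - (m.getD i []).getD j 0))) mat

-- copy(mat): nested append loops building a fresh n×n list
def pvCopy (mat : List (List Int)) : List (List Int) :=
  (List.range mat.length).foldl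
    (fun acc i => acc ++ [(List.range mat.length).foldl
      (fun r j => r ++ [(mat.getD i []).getD j 0]) []]) []

def perform_inversions (mat : List (List Int)) (row_str : String) (col_str : String) : List (List Int) :=
  let inversion_mat := pvCopy mat
  let n := mat.length
  let m1 := (List.range n).foldl
    (fun m s => if row_str.toList.getD s ' ' == '1' then pvInvertRow m s else m) inversion_mat
  (List.range n).foldl
    (fun m t => if col_str.toList.getD t ' ' == '1' then pvInvertCol m t else m) m1

-- ===== PORT B =====
def perform_inversions_alt (mat : List (List Int)) (row_str : String) (col_str : String) : List (List Int) :=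
  let n := mat.length
  let rows := (List.range n).map (fun i => row_str.toList.getD i ' ' == '1')
  let cols := (List.range n).map (fun j => col_str.toList.getD j ' ' == '1')
  (PySem.List.enumerate mat).map (fun p =>
    (List.range n).map (fun j =>
      if rows.getD p.1.toNat false == cols.getD j false
      then p.2.getD j 0 else 1 - p.2.getD j 0))

-- ===== PRECONDITION & SPEC =====
-- Pre_ excludes exactly the inputs where Python A raises an IndexError: a row of mat shorter
-- than len(mat), or row_str/col_str shorter than len(mat).
def Pre_perform_inversions (mat : List (List Int)) (row_str : String) (col_str : String) : Prop :=
  mat.length ≤ row_str.toList.length ∧ mat.length ≤ col_str.toList.length ∧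
  ∀ row ∈ mat, mat.length ≤ row.length
instance (mat : List (List Int)) (row_str : String) (col_str : String) : Decidable (Pre_perform_inversions mat row_str col_str) := by unfold Pre_perform_inversions; infer_instance

def pvWitness_perform_inversions : List (List Int) × String × String :=
  ([[1, 0], [0, 7]], "10", "01")

def Spec_perform_inversions (mat : List (List Int)) (row_str : String) (col_str : String) (out : List (List Int)) : Prop := out = perform_inversions_alt mat row_str col_str
instance (mat : List (List Int)) (row_str : String) (col_str : String) (out : List (List Int)) : Decidable (Spec_perform_inversions mat row_str col_str out) := by unfold Spec_perform_inversions; infer_instance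

-- ===== CLAIM (what is proved, stated in full; the proofs are below) =====
def Claim_equal_perform_inversions : Prop := ∀ (mat : List (List Int)) (row_str : String) (col_str : String), Dom_perform_inversions mat row_str col_str → Pre_perform_inversions mat row_str col_str → Spec_perform_inversions mat row_str col_str (perform_inversions mat row_str col_str)

-- ===== LEMMAS AND PROOFS =====

-- one conditional in-place flip at index t of a single row (proof-side spec of the loop bodies)
def pvFlipStep (c : Nat → Bool) (r : List Int) (t : Nat) : List Int :=
  if c t then r.set t (1 - r.getD t 0) else r

theorem pvFlipStep_length (c : Nat → Bool) (r : List Int) (t : Nat) :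
    (pvFlipStep c r t).length = r.length := by
  unfold pvFlipStep; split <;> simp

theorem pvFlipFold_length (c : Nat → Bool) (ts : List Nat) (r : List Int) :
    (ts.foldl (pvFlipStep c) r).length = r.length := by
  induction ts generalizing r with
  | nil => rfl
  | cons t ts ih => simp [List.foldl_cons, ih, pvFlipStep_length]

theorem pvFlipFold_getD (c : Nat → Bool) (k : Nat) (r : List Int) (j : Nat)
    (hk : k ≤ r.length) (hj : j < r.length) :
    ((List.range k).foldl (pvFlipStep c) r).getD j 0
      = if j < k ∧ c j then 1 - r.getD j 0 else r.getD j 0 := by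
  induction k with
  | zero => simp
  | succ k ih =>
    have hk' : k ≤ r.length := Nat.le_of_succ_le hk
    rw [List.range_succ, List.foldl_append]
    simp only [List.foldl_cons, List.foldl_nil]
    set F := (List.range k).foldl (pvFlipStep c) r with hF
    have hlen : F.length = r.length := pvFlipFold_length c _ r
    by_cases hc : c k
    · rw [show pvFlipStep c F k = F.set k (1 - F.getD k 0) from by
        simp [pvFlipStep, hc]]
      by_cases hjk : j = k
      · subst hjk
        rw [List.getD_eq_getElem?_getD, List.getElem?_set_self',
            List.getElem?_eq_getElem (by omega : j < F.length)]
        have hFj : F.getD j 0 = r.getD j 0 := by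
          rw [ih hk']; simp
        rw [← List.getD_eq_getElem F 0 (by omega), hFj]
        simp [hc]
      · rw [List.getD_eq_getElem?_getD, List.getElem?_set_ne (by omega),
            ← List.getD_eq_getElem?_getD, ih hk']
        have h2 : (j < k + 1 ∧ c j = true) = (j < k ∧ c j = true) := by
          apply propext; constructor
          · rintro ⟨a, b⟩; exact ⟨by omega, b⟩
          · rintro ⟨a, b⟩; exact ⟨by omega, b⟩
        exact (if_congr (iff_of_eq h2) rfl rfl).symm
    · rw [show pvFlipStep c F k = F from by simp [pvFlipStep, hc]]
      rw [ih hk']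
      have h2 : (j < k + 1 ∧ c j = true) = (j < k ∧ c j = true) := by
        apply propext; constructor
        · rintro ⟨a, b⟩
          rcases Nat.lt_succ_iff_lt_or_eq.mp a with h | h
          · exact ⟨h, b⟩
          · subst h; simp [hc] at b
        · rintro ⟨a, b⟩; exact ⟨by omega, b⟩
      exact (if_congr (iff_of_eq h2) rfl rfl).symm

-- hoisting an inner "mat[i][j] = …" loop to a single row update
theorem pvRowFold_hoist (js : List Nat) (m : List (List Int)) (i : Nat) (hi : i < m.length) :
    js.foldl (fun m j => m.set i ((m.getD i []).set j (1 - (m.getD i []).getD j 0))) m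
      = m.set i (js.foldl (pvFlipStep (fun _ => true)) (m.getD i [])) := by
  induction js generalizing m with
  | nil =>
    simp only [List.foldl_nil]
    rw [List.getD_eq_getElem _ _ hi, List.set_getElem_self]
  | cons j js ih =>
    simp only [List.foldl_cons]
    rw [ih _ (by simpa using hi), List.set_set]
    have hy : (m.set i ((m.getD i []).set j (1 - (m.getD i []).getD j 0))).getD i []
        = pvFlipStep (fun _ => true) (m.getD i []) j := by
      rw [List.getD_eq_getElem?_getD, List.getElem?_set_self', List.getElem?_eq_getElem hi]
      simp [pvFlipStep, List.getD_eq_getElem?_getD]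
    rw [hy]

theorem pvInvertRow_eq (m : List (List Int)) (i : Nat) (hi : i < m.length) :
    pvInvertRow m i
      = m.set i ((List.range m.length).foldl (pvFlipStep (fun _ => true)) (m.getD i [])) := by
  unfold pvInvertRow
  exact pvRowFold_hoist _ m i hi

-- the "set every row" fold is a take/drop map
theorem pvSetFold_eq (f : List Int → List Int) (k : Nat) (m : List (List Int)) (hk : k ≤ m.length) :
    (List.range k).foldl (fun m i => m.set i (f (m.getD i []))) m
      = (m.take k).map f ++ m.drop k := by
  induction k with
  | zero => simp
  | succ k ih =>
    have hk' : k ≤ m.length := Nat.le_of_succ_le hk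
    rw [List.range_succ, List.foldl_append]
    simp only [List.foldl_cons, List.foldl_nil]
    rw [ih hk']
    have hklen : ((m.take k).map f).length = k := by simp [Nat.min_eq_left hk']
    have hkm : k < m.length := hk
    have hdrop : m.drop k = m[k] :: m.drop (k + 1) := (List.drop_eq_getElem_cons hkm)
    have hget : ((m.take k).map f ++ m.drop k).getD k [] = m[k] := by
      rw [hdrop, List.getD_eq_getElem?_getD, List.getElem?_append_right (by omega)]
      rw [hklen, Nat.sub_self]
      simp [List.getElem?_eq_getElem hkm]
    rw [hget, hdrop, List.set_append, if_neg (by simp)]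
    rw [hklen, Nat.sub_self, List.set_cons_zero]
    have hfin : List.take k (List.map f m) ++ f m[k] :: List.drop (k + 1) m
        = List.take (k + 1) (List.map f m) ++ List.drop (k + 1) m := by
      rw [List.take_add_one,
          List.getElem?_eq_getElem (show k < (List.map f m).length by simpa using hkm)]
      simp
    simpa using hfin

theorem pvInvertCol_eq (m : List (List Int)) (j : Nat) :
    pvInvertCol m j = m.map (fun r => r.set j (1 - r.getD j 0)) := by
  unfold pvInvertCol
  rw [pvSetFold_eq (fun r => r.set j (1 - r.getD j 0)) m.length m le_rfl]
  simp

-- the conditional column loop acts row-wise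
theorem pvColLoop_eq (C : Nat → Bool) (ts : List Nat) (m : List (List Int)) :
    ts.foldl (fun m t => if C t then pvInvertCol m t else m) m
      = m.map (fun r => ts.foldl (pvFlipStep C) r) := by
  induction ts generalizing m with
  | nil => simp
  | cons t ts ih =>
    simp only [List.foldl_cons]
    by_cases hc : C t
    · rw [if_pos hc, pvInvertCol_eq, ih, List.map_map]
      congr 1
      funext r
      simp [Function.comp, pvFlipStep, hc]
    · rw [if_neg hc, ih]
      congr 1
      funext r
      simp [pvFlipStep, hc]

-- the conditional row loop is a mapIdx
theorem pvRowLoop_eq (P : Nat → Bool) (k : Nat) (m : List (List Int)) (hk : k ≤ m.length) :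
    (List.range k).foldl (fun m s => if P s then pvInvertRow m s else m) m
      = m.mapIdx (fun i r =>
          if i < k ∧ P i then (List.range m.length).foldl (pvFlipStep (fun _ => true)) r else r) := by
  induction k with
  | zero =>
    apply List.ext_getElem
    · simp
    · intro i h1 h2
      simp [List.getElem_mapIdx]
  | succ k ih =>
    have hk' : k ≤ m.length := Nat.le_of_succ_le hk
    have hkm : k < m.length := hk
    rw [List.range_succ, List.foldl_append]
    simp only [List.foldl_cons, List.foldl_nil]
    rw [ih hk']
    set g := fun (i : Nat) (r : List Int) =>
      if i < k ∧ P i then (List.range m.length).foldl (pvFlipStep (fun _ => true)) r else r with hg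
    have hglen : (m.mapIdx g).length = m.length := by simp
    by_cases hp : P k
    · rw [if_pos hp]
      rw [pvInvertRow_eq _ _ (by omega)]
      have hget : (m.mapIdx g).getD k [] = m[k] := by
        rw [List.getD_eq_getElem?_getD, List.getElem?_eq_getElem (by omega)]
        simp [hg, List.getElem_mapIdx]
      rw [hget, hglen]
      apply List.ext_getElem
      · simp
      · intro i h1 h2
        rw [List.getElem_set]
        have hi : i < m.length := by simpa using h2
        by_cases hik : i = k
        · subst hik
          rw [if_pos rfl, List.getElem_mapIdx]
          rw [if_pos ⟨by omega, hp⟩]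
        · rw [if_neg (fun h => hik h.symm)]
          simp only [List.getElem_mapIdx, hg]
          have h2 : (i < k + 1 ∧ P i = true) = (i < k ∧ P i = true) := by
            apply propext; constructor
            · rintro ⟨h3, h4⟩; exact ⟨by omega, h4⟩
            · rintro ⟨h3, h4⟩; exact ⟨by omega, h4⟩
          exact (if_congr (iff_of_eq h2) rfl rfl).symm
    · rw [if_neg hp]
      apply List.ext_getElem
      · simp
      · intro i h1 h2
        simp only [List.getElem_mapIdx, hg]
        have h2 : (i < k + 1 ∧ P i = true) = (i < k ∧ P i = true) := by
          apply propext; constructor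
          · rintro ⟨h3, h4⟩
            rcases Nat.lt_succ_iff_lt_or_eq.mp h3 with h | h
            · exact ⟨h, h4⟩
            · subst h; simp [hp] at h4
          · rintro ⟨h3, h4⟩; exact ⟨by omega, h4⟩
        exact (if_congr (iff_of_eq h2) rfl rfl).symm

-- copy builds the n×n matrix of (truncated) cells
theorem pvCopy_eq (mat : List (List Int)) :
    pvCopy mat = (List.range mat.length).map (fun i =>
      (List.range mat.length).map (fun j => (mat.getD i []).getD j 0)) := by
  unfold pvCopy
  rw [PySem.List.foldl_append_singleton_eq_map]
  simp only [List.nil_append]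
  congr 1
  funext i
  rw [PySem.List.foldl_append_singleton_eq_map]
  simp

-- ===== VERDICT (by name: the statement is the Claim_ definition above) =====
theorem perform_inversions_spec : Claim_equal_perform_inversions := by
  intro mat rs cs _hdom _hpre
  unfold Spec_perform_inversions perform_inversions perform_inversions_alt
  simp only [pvCopy_eq]
  rw [pvRowLoop_eq (fun s => rs.toList.getD s ' ' == '1') mat.length _ (by simp)]
  rw [pvColLoop_eq (fun t => cs.toList.getD t ' ' == '1') (List.range mat.length) _]
  apply List.ext_getElem
  · simp [PySem.List.length_enumerate]
  · intro i h1 h2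
    have hi : i < mat.length := by simpa [PySem.List.length_enumerate] using h2
    simp only [List.getElem_map, List.getElem_mapIdx, PySem.List.getElem_enumerate,
      List.getElem_range, List.length_map, List.length_range]
    simp only [hi, true_and]
    have h0i : ((0 : Int) + (i : Int)).toNat = i := by omega
    simp only [h0i, PySem.List.getD_map_range _ _ _ _ hi]
    have hmi : mat.getD i [] = mat[i] := List.getD_eq_getElem mat [] hi
    apply List.ext_getElem
    · split <;> simp [pvFlipFold_length]
    · intro j hj1 hj2
      have hjn : j < mat.length := by simpa using hj2
      rw [List.getElem_map, List.getElem_range]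
      rw [← List.getD_eq_getElem _ 0 hj1]
      rw [pvFlipFold_getD _ _ _ _ (by split <;> simp [pvFlipFold_length])
        (by split <;> simp [pvFlipFold_length, hjn])]
      simp only [PySem.List.getD_map_range _ _ _ _ hjn, hmi]
      by_cases hP : (rs.toList.getD i ' ' == '1') = true
      · simp only [hP, if_true]
        rw [pvFlipFold_getD _ _ _ _ (by simp) (by simp [hjn])]
        simp only [PySem.List.getD_map_range _ _ _ _ hjn]
        by_cases hC : (cs.toList.getD j ' ' == '1') = true
        · simp [hjn]
        · simp [hjn]
      · simp only [hP]
        by_cases hC : (cs.toList.getD j ' ' == '1') = true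
        · simp [hjn]
        · simp [hjn]
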